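-- pv_equiv track=rewrite | github.com/Unchhh/Folder | exercises/09_functions/task_9_1.py | generate_access_config
-- ===== SOURCE A (Python) =====
-- def generate_access_config(intf_vlan_mapping, access_template):
-- 		'''
-- 		intf_vlan_mapping - словарь с соответствием интерфейс-VLAN такого вида:
-- 				{'FastEthernet0/12':10,
-- 				 'FastEthernet0/14':11,
-- 				 'FastEthernet0/16':17}
-- 		access_template - список команд для порта в режиме access
--
-- 		Возвращает список всех портов в режиме access с конфигурацией на основе шаблона
-- 		'''
-- 		#Решение
-- 		ans = []
-- 		for inter,vlan in intf_vlan_mapping.items():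
-- 						ans.append('interface {}'.format(inter))
-- 						for g in range(0,len(access_template),1):
-- 										if g==1:
-- 												ans.append('{} {}'.format(access_template[g],vlan))
-- 												continue
-- 										ans.append(access_template[g])
-- 		return ans
-- ===== SOURCE B (Python) =====
-- def generate_access_config(intf_vlan_mapping, access_template):
--     # Compile the template once into a list of line-maker closures,
--     # then apply the compiled makers to every (interface, vlan) pair.
--     makers = [lambda inter, vlan: 'interface ' + inter]
--     for g, line in enumerate(access_template):
--         if g == 1:
--             makers.append(lambda inter, vlan, line=line: line + ' ' + str(vlan))
--         else:
--             makers.append(lambda inter, vlan, line=line: line)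
--     ans = []
--     for inter, vlan in intf_vlan_mapping.items():
--         ans += [make(inter, vlan) for make in makers]
--     return ans
-- ===== Notes on version B (the rewrite author's own statement) =====
-- stated objective: alternative
-- what changed: B partially evaluates the template once into a list of line-maker closures (the g==1 branch runs only at compile time), then each (interface, vlan) entry is produced by applying the compiled makers, instead of A's per-entry index loop with its g==1/continue branch.
import Mathlib
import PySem

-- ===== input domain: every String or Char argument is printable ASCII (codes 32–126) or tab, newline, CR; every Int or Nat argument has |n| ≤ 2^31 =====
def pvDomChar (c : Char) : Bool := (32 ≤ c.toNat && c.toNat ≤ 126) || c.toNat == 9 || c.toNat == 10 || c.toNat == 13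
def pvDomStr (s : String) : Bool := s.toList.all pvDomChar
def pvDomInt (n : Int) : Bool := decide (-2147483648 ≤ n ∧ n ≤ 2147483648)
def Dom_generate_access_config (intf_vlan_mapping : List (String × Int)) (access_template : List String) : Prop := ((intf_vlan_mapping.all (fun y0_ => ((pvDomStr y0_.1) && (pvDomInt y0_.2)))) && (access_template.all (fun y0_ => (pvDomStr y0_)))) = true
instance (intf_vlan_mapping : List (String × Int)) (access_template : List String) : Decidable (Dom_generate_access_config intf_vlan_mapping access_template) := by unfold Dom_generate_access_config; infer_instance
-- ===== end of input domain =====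

-- B compiles the template once into a list of line-maker closures and applies them to
-- every entry, instead of A's per-entry index loop with its g==1/continue branch.

-- ===== PORT A =====
def generate_access_config (intf_vlan_mapping : List (String × Int)) (access_template : List String) : List String :=
  intf_vlan_mapping.foldl
    (fun ans p =>
      (PySem.List.pyRange 0 (access_template.length : Int) 1).foldl
        (fun ans g =>
          if g == 1 then
            ans ++ [PySem.List.pyGetD access_template g "" ++ " " ++ PySem.Int.toStr p.2]
          else
            ans ++ [PySem.List.pyGetD access_template g ""])
        (ans ++ ["interface " ++ p.1]))
    []

-- ===== PORT B =====
-- compile the template once into line-maker closures (the g==1 test runs here only)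
def pvCompile (access_template : List String) : List (String → Int → String) :=
  (PySem.List.enumerate access_template 0).foldl
    (fun makers p =>
      if p.1 == 1 then
        makers ++ [fun _ vlan => p.2 ++ " " ++ PySem.Int.toStr vlan]
      else
        makers ++ [fun _ _ => p.2])
    [fun inter _ => "interface " ++ inter]

def generate_access_config_alt (intf_vlan_mapping : List (String × Int)) (access_template : List String) : List String :=
  let makers := pvCompile access_template
  intf_vlan_mapping.foldl
    (fun ans p => ans ++ makers.map (fun make => make p.1 p.2)) []

-- ===== PRECONDITION & SPEC =====
def Spec_generate_access_config (intf_vlan_mapping : List (String × Int)) (access_template : List String) (out : List String) : Prop := out = generate_access_config_alt intf_vlan_mapping access_template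
instance (intf_vlan_mapping : List (String × Int)) (access_template : List String) (out : List String) : Decidable (Spec_generate_access_config intf_vlan_mapping access_template out) := by unfold Spec_generate_access_config; infer_instance

-- ===== CLAIM =====
def Claim_equal_generate_access_config : Prop := ∀ (intf_vlan_mapping : List (String × Int)) (access_template : List String), Dom_generate_access_config intf_vlan_mapping access_template → Spec_generate_access_config intf_vlan_mapping access_template (generate_access_config intf_vlan_mapping access_template)

-- ===== LEMMAS AND PROOFS =====

-- the compiled makers, written as a cons of a map over the enumeration
theorem pvCompile_eq (t : List String) :
    pvCompile t
      = (fun inter _ => "interface " ++ inter) ::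
        (PySem.List.enumerate t 0).map
          (fun p => if p.1 == 1 then (fun _ vlan => p.2 ++ " " ++ PySem.Int.toStr vlan)
                    else (fun (_ : String) (_ : Int) => p.2)) := by
  unfold pvCompile
  rw [show (fun (makers : List (String → Int → String)) (p : Int × String) =>
      if p.1 == 1 then makers ++ [fun _ vlan => p.2 ++ " " ++ PySem.Int.toStr vlan]
      else makers ++ [fun _ _ => p.2])
    = (fun makers p => makers ++
        [if p.1 == 1 then (fun _ vlan => p.2 ++ " " ++ PySem.Int.toStr vlan)
         else (fun (_ : String) (_ : Int) => p.2)]) from by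
      funext m p; by_cases h : p.1 == 1 <;> simp [h]]
  rw [PySem.List.foldl_append_singleton_eq_map]
  rfl

-- applying the compiled makers to one entry yields A's per-entry block
theorem pv_apply (t : List String) (i : String) (v : Int) :
    (pvCompile t).map (fun make => make i v)
      = ("interface " ++ i) ::
        (PySem.List.pyRange 0 (t.length : Int) 1).map
          (fun g => if g == 1 then PySem.List.pyGetD t g "" ++ " " ++ PySem.Int.toStr v
                    else PySem.List.pyGetD t g "") := by
  rw [pvCompile_eq, List.map_cons, PySem.List.enumerate_eq_map_pyRange (d := ""),
    List.map_map, List.map_map]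
  simp only [PySem.List.len]
  congr 1
  refine List.map_congr_left fun j _ => ?_
  by_cases h : j = 1 <;> simp [h]

-- A's inner loop over range(len(template)) appends exactly that block's tail
theorem pv_inner_eq (t : List String) (v : Int) (i : String) (ans : List String) :
    (PySem.List.pyRange 0 (t.length : Int) 1).foldl
      (fun ans g =>
        if g == 1 then ans ++ [PySem.List.pyGetD t g "" ++ " " ++ PySem.Int.toStr v]
        else ans ++ [PySem.List.pyGetD t g ""]) (ans ++ ["interface " ++ i])
    = ans ++ (pvCompile t).map (fun make => make i v) := by
  rw [show (fun (ans : List String) (g : Int) =>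
        if g == 1 then ans ++ [PySem.List.pyGetD t g "" ++ " " ++ PySem.Int.toStr v]
        else ans ++ [PySem.List.pyGetD t g ""])
      = (fun (ans : List String) (g : Int) =>
        ans ++ [if g == 1 then PySem.List.pyGetD t g "" ++ " " ++ PySem.Int.toStr v
                else PySem.List.pyGetD t g ""]) from by
      funext a g; by_cases h : g == 1 <;> simp [h]]
  rw [PySem.List.foldl_append_singleton_eq_map, pv_apply]
  simp

theorem pv_main (t : List String) (m : List (String × Int)) (ans : List String) :
    m.foldl
      (fun ans p =>
        (PySem.List.pyRange 0 (t.length : Int) 1).foldl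
          (fun ans g =>
            if g == 1 then ans ++ [PySem.List.pyGetD t g "" ++ " " ++ PySem.Int.toStr p.2]
            else ans ++ [PySem.List.pyGetD t g ""])
          (ans ++ ["interface " ++ p.1])) ans
    = m.foldl (fun ans p => ans ++ (pvCompile t).map (fun make => make p.1 p.2)) ans := by
  induction m generalizing ans with
  | nil => rfl
  | cons p m ih => simp only [List.foldl_cons]; rw [pv_inner_eq, ih]

-- ===== VERDICT =====
theorem generate_access_config_spec : Claim_equal_generate_access_config := by
  intro m t _
  show generate_access_config m t = generate_access_config_alt m t
  unfold generate_access_config generate_access_config_alt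
  exact pv_main t m []
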